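-- pv_equiv track=rewrite | github.com/FaivelFedulloSilva/kripr | dashapp/app.py | process_bam_histogram
-- ===== SOURCE A (Python) =====
-- def process_bam_histogram(histogram_as_dict: dict[int,int]):
--     max_key = max(histogram_as_dict.keys())
--
--     keys_list = []
--     values_list = []
--
--     for i in range(max_key+1):
--         keys_list.append(i)
--         if i in histogram_as_dict:
--             values_list.append(histogram_as_dict[i])
--         else:
--             values_list.append(0)
--     return [keys_list, values_list]
-- ===== SOURCE B (Python) =====
-- def process_bam_histogram(histogram_as_dict: dict[int, int]):
--     max_key = max(histogram_as_dict.keys())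
--     # negative keys never appear in range(max_key+1), so A ignores them; drop them here
--     items = sorted(((k, v) for k, v in histogram_as_dict.items() if k >= 0),
--                    key=lambda p: p[0])
--     keys_list = list(range(max_key + 1))
--     values_list = []
--     prev = 0
--     for k, v in items:
--         values_list.extend([0] * (k - prev))
--         values_list.append(v)
--         prev = k + 1
--     values_list.extend([0] * (max_key + 1 - prev))
--     return [keys_list, values_list]
-- ===== Notes on version B (the rewrite author's own statement) =====
-- stated objective: alternative
-- what changed: Instead of scanning range(max_key+1) and looking each index up in the dict, B sorts the nonnegative dict items by key and emits the values list in one gap-filling sweep (runs of zeros between consecutive present keys), never querying the dict per index.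
import Mathlib
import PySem

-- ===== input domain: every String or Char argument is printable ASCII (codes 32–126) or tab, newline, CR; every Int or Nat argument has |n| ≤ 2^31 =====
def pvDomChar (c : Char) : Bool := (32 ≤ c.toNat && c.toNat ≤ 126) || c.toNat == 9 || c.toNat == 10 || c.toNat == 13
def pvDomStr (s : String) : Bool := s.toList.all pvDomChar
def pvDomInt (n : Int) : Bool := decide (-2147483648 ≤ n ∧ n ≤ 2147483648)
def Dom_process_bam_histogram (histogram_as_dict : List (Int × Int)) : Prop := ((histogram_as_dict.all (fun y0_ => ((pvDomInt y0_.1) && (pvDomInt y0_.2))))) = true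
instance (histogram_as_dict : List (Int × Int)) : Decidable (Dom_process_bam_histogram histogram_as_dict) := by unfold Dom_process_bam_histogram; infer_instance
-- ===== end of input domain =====

-- B replaces A's per-index dict lookup over range(max_key+1) by a sort-then-sweep:
-- sort the nonnegative items by key and emit zero runs between consecutive keys
-- (objective: alternative algorithm, same cost).

-- ===== PORT A =====
-- max(histogram_as_dict.keys()); range loop appending (i, d[i] if i in d else 0).
def process_bam_histogram (histogram_as_dict : List (Int × Int)) : List (List Int) :=
  -- histogram_as_dict, a Python dict, arrives as an assoc list; Dict.ofList is its dict
  match PySem.List.max? (PySem.Dict.ofList histogram_as_dict).keys id with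
  | none => []   -- Python's max raises ValueError on an empty dict; excluded by Pre_
  | some max_key =>
    let d := PySem.Dict.ofList histogram_as_dict
    let st := (PySem.List.pyRange 0 (max_key + 1)).foldl
      (fun (acc : List Int × List Int) i =>
        (acc.1 ++ [i], acc.2 ++ [if d.contains i then d.getD i 0 else 0]))
      ([], [])
    [st.1, st.2]

-- ===== PORT B =====
-- Source B: sort the items with nonnegative key by key, then one gap-filling sweep:
-- state (values_list, prev); each (k,v) extends with (k-prev) zeros then v; final pad.
-- [0]*(k-prev) is List.replicate (k-prev).toNat 0: Python's [0]*m is [] for m ≤ 0, exact.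
def process_bam_histogram_alt (histogram_as_dict : List (Int × Int)) : List (List Int) :=
  match PySem.List.max? (PySem.Dict.ofList histogram_as_dict).keys id with
  | none => []   -- Python's max raises ValueError on an empty dict; excluded by Pre_
  | some max_key =>
    let items := PySem.List.sorted
      ((PySem.Dict.ofList histogram_as_dict).items.filter (fun p => 0 ≤ p.1))
      (fun p => p.1)
    let keys_list := PySem.List.pyRange 0 (max_key + 1)
    let st := items.foldl
      (fun (acc : List Int × Int) p =>
        (acc.1 ++ List.replicate (p.1 - acc.2).toNat 0 ++ [p.2], p.1 + 1))
      ([], 0)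
    [keys_list, st.1 ++ List.replicate (max_key + 1 - st.2).toNat 0]

-- ===== PRECONDITION & SPEC =====
-- Python A raises ValueError (max of empty sequence) on the empty dict; nothing else is excluded.
def Pre_process_bam_histogram (histogram_as_dict : List (Int × Int)) : Prop :=
  histogram_as_dict ≠ []
instance (histogram_as_dict : List (Int × Int)) : Decidable (Pre_process_bam_histogram histogram_as_dict) := by unfold Pre_process_bam_histogram; infer_instance

def pvWitness_process_bam_histogram : (List (Int × Int)) := [(2, 3), (0, 1)]

def Spec_process_bam_histogram (histogram_as_dict : List (Int × Int)) (out : List (List Int)) : Prop := out = process_bam_histogram_alt histogram_as_dict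
instance (histogram_as_dict : List (Int × Int)) (out : List (List Int)) : Decidable (Spec_process_bam_histogram histogram_as_dict out) := by unfold Spec_process_bam_histogram; infer_instance

-- ===== CLAIM (what is proved, stated in full; the proofs are below) =====
def Claim_equal_process_bam_histogram : Prop := ∀ (histogram_as_dict : List (Int × Int)), Dom_process_bam_histogram histogram_as_dict → Pre_process_bam_histogram histogram_as_dict → Spec_process_bam_histogram histogram_as_dict (process_bam_histogram histogram_as_dict)

-- ===== LEMMAS AND PROOFS =====

-- the value B's sweep puts at index j: the value of the item with key j, else 0
def pvLook (items : List (Int × Int)) (j : Int) : Int :=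
  match items.find? (fun p => p.1 == j) with
  | some p => p.2
  | none => 0

-- the list B's sweep builds over the items, starting the gap counter at prev
def pvFill : Int → List (Int × Int) → List Int
  | _, [] => []
  | prev, (k, v) :: rest => List.replicate (k - prev).toNat 0 ++ v :: pvFill (k + 1) rest

-- the final value of B's prev counter
def pvFinal : Int → List (Int × Int) → Int
  | prev, [] => prev
  | _, (k, _) :: rest => pvFinal (k + 1) rest

theorem pv_foldl_fill (items : List (Int × Int)) (vs : List Int) (prev : Int) :
    items.foldl
      (fun (acc : List Int × Int) p =>
        (acc.1 ++ List.replicate (p.1 - acc.2).toNat 0 ++ [p.2], p.1 + 1))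
      (vs, prev)
      = (vs ++ pvFill prev items, pvFinal prev items) := by
  induction items generalizing vs prev with
  | nil => simp [pvFill, pvFinal]
  | cons p rest ih =>
    obtain ⟨k, v⟩ := p
    rw [List.foldl_cons, ih]
    simp [pvFill, pvFinal]

theorem pvLook_eq_zero_of_lt (items : List (Int × Int)) (j : Int)
    (h : ∀ p ∈ items, j < p.1) : pvLook items j = 0 := by
  unfold pvLook
  rw [List.find?_eq_none.mpr]
  intro p hp
  simpa using (h p hp).ne'

theorem pv_fill_eq (items : List (Int × Int)) (mk : Int) :
    ∀ prev, items.Pairwise (fun a b => a.1 < b.1) →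
    (∀ p ∈ items, prev ≤ p.1) → (∀ p ∈ items, p.1 ≤ mk) →
    pvFill prev items ++ List.replicate (mk + 1 - pvFinal prev items).toNat 0
      = (PySem.List.pyRange prev (mk + 1)).map (fun j => pvLook items j) := by
  induction items with
  | nil =>
    intro prev _ _ _
    have : (PySem.List.pyRange prev (mk + 1)).map (fun j => pvLook [] j)
        = List.replicate (PySem.List.pyRange prev (mk + 1)).length 0 := by
      simp [pvLook]
    simp [pvFill, pvFinal, this, PySem.List.length_pyRange_one]
  | cons p rest ih =>
    intro prev hpw hlb hub
    obtain ⟨k, v⟩ := p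
    have hpk : prev ≤ k := hlb _ (List.mem_cons_self ..)
    have hkm : k ≤ mk := hub _ (List.mem_cons_self ..)
    have hrest : ∀ q ∈ rest, k < q.1 := by
      intro q hq; exact List.rel_of_pairwise_cons hpw hq
    rw [PySem.List.pyRange_one_append prev k (mk + 1) hpk (by omega),
        PySem.List.pyRange_one_append k (k + 1) (mk + 1) (by omega) (by omega),
        PySem.List.pyRange_one_singleton]
    have h1 : (PySem.List.pyRange prev k).map (fun j => pvLook ((k, v) :: rest) j)
        = List.replicate (k - prev).toNat 0 := by
      rw [List.map_congr_left (g := fun _ => (0 : Int))]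
      · simp [PySem.List.length_pyRange_one]
      · intro j hj
        have hj' := (PySem.List.mem_pyRange_one).mp hj
        apply pvLook_eq_zero_of_lt
        intro q hq
        rcases List.mem_cons.mp hq with rfl | hq'
        · omega
        · have := hrest q hq'; omega
    have h2 : pvLook ((k, v) :: rest) k = v := by
      simp [pvLook]
    have h3 : (PySem.List.pyRange (k + 1) (mk + 1)).map (fun j => pvLook ((k, v) :: rest) j)
        = (PySem.List.pyRange (k + 1) (mk + 1)).map (fun j => pvLook rest j) := by
      apply List.map_congr_left
      intro j hj
      have hj' := (PySem.List.mem_pyRange_one).mp hj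
      unfold pvLook
      rw [List.find?_cons_of_neg (by simp only [beq_iff_eq]; omega)]
    have hih := ih (k + 1) (List.Pairwise.of_cons hpw)
      (fun q hq => by have := hrest q hq; omega)
      (fun q hq => hub q (List.mem_cons_of_mem _ hq))
    simp only [List.map_append, h1, h2, h3, List.map_cons, List.map_nil]
    rw [← hih]
    simp [pvFill, pvFinal]

-- for 0 ≤ j, A's per-index value equals B's pvLook over the sorted nonnegative items
theorem pv_look_eq_dict (h : List (Int × Int)) (j : Int) (hj : 0 ≤ j) :
    (if (PySem.Dict.ofList h).contains j then (PySem.Dict.ofList h).getD j 0 else 0)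
      = pvLook (PySem.List.sorted
          ((PySem.Dict.ofList h).items.filter (fun p => 0 ≤ p.1)) (fun p => p.1)) j := by
  set d := PySem.Dict.ofList h with hd
  set items := PySem.List.sorted (d.items.filter (fun p => 0 ≤ p.1)) (fun p => p.1) with hit
  have hnd : d.keys.Nodup := PySem.Dict.nodup_keys_ofList h
  have hmem : ∀ p : Int × Int, p ∈ items ↔ p ∈ d.items ∧ 0 ≤ p.1 := by
    intro p
    rw [hit, PySem.List.mem_sorted _ _ _ _, List.mem_filter]
    simp
  by_cases hc : d.contains j
  · rw [if_pos hc]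
    have : ∃ v, d.get? j = some v := by
      have := PySem.Dict.contains_eq_isSome_get? (d := d) (k := j)
      rw [hc] at this
      exact Option.isSome_iff_exists.mp this.symm
    obtain ⟨v, hv⟩ := this
    have hmi : (j, v) ∈ d.items := PySem.Dict.mem_items_of_get?_eq_some d hv
    have hji : (j, v) ∈ items := (hmem _).mpr ⟨hmi, hj⟩
    have hgd : d.getD j 0 = v := PySem.Dict.getD_of_mem_items d hmi hnd 0
    unfold pvLook
    cases hf : items.find? (fun p => p.1 == j) with
    | none =>
      exact absurd ((List.find?_eq_none.mp hf) _ hji) (by simp)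
    | some q =>
      have hq := List.find?_some hf
      have hqm := List.mem_of_find?_eq_some hf
      have hq1 : q.1 = j := by simpa using hq
      have hqd : (q.1, q.2) ∈ d.items := ((hmem q).mp hqm).1
      rw [hq1] at hqd
      have : d.getD j 0 = q.2 := PySem.Dict.getD_of_mem_items d hqd hnd 0
      exact this
  · rw [if_neg hc]
    unfold pvLook
    rw [List.find?_eq_none.mpr]
    intro p hp
    have hpd := ((hmem p).mp hp).1
    have : p.1 ∈ d.keys := PySem.Dict.mem_keys_of_mem_items d hpd
    simp only [beq_iff_eq]
    intro he
    exact hc ((PySem.Dict.contains_iff_mem_keys d j).mpr (he ▸ this))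

-- ===== VERDICT (by name: the statement is the Claim_ definition above) =====
theorem process_bam_histogram_spec : Claim_equal_process_bam_histogram := by
  intro h _ _
  unfold Spec_process_bam_histogram process_bam_histogram process_bam_histogram_alt
  cases hm : PySem.List.max? (PySem.Dict.ofList h).keys id with
  | none => rfl
  | some max_key =>
    simp only
    set d := PySem.Dict.ofList h with hd
    set items := PySem.List.sorted (d.items.filter (fun p => 0 ≤ p.1)) (fun p => p.1) with hit
    have hnd : d.keys.Nodup := PySem.Dict.nodup_keys_ofList h
    -- A's loop splits into the two appended lists
    rw [PySem.List.foldl_prod_mk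
      (fun s (i : Int) => s ++ [i])
      (fun s (i : Int) => s ++ [if d.contains i then d.getD i 0 else 0])]
    simp only [PySem.List.foldl_append_singleton_eq_map, List.nil_append, List.map_id']
    -- B's loop is the gap-filling sweep
    rw [pv_foldl_fill, List.nil_append]
    -- items has strictly increasing keys, all in [0, max_key]
    have hkeysnd : (items.map Prod.fst).Nodup := by
      have h1 : ((d.items.filter (fun p => 0 ≤ p.1)).map Prod.fst).Sublist (d.items.map Prod.fst) :=
        List.Sublist.map Prod.fst List.filter_sublist
      have h2 : (d.items.map Prod.fst).Nodup := by
        simpa [PySem.Dict.keys] using hnd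
      have h3 : ((d.items.filter (fun p => 0 ≤ p.1)).map Prod.fst).Nodup := h1.nodup h2
      have hp : (items.map Prod.fst).Perm ((d.items.filter (fun p => 0 ≤ p.1)).map Prod.fst) :=
        (PySem.List.sorted_perm _ _ _).map _
      exact hp.nodup_iff.mpr h3
    have hpw : items.Pairwise (fun a b => a.1 < b.1) := by
      have hle : items.Pairwise (fun a b => a.1 ≤ b.1) :=
        PySem.List.sorted_pairwise _ _
      have hne : items.Pairwise (fun a b => a.1 ≠ b.1) :=
        (List.pairwise_map).mp hkeysnd
      exact (hle.and hne).imp (fun ⟨h1, h2⟩ => lt_of_le_of_ne h1 h2)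
    have hlb : ∀ p ∈ items, (0 : Int) ≤ p.1 := by
      intro p hp
      have h' := (PySem.List.mem_sorted _ _ _ _).mp (hit ▸ hp)
      simpa using (List.mem_filter.mp h').2
    have hub : ∀ p ∈ items, p.1 ≤ max_key := by
      intro p hp
      have hm' : p.1 ∈ d.keys := by
        have := (PySem.List.mem_sorted _ _ _ _).mp (hit ▸ hp)
        exact PySem.Dict.mem_keys_of_mem_items d (List.mem_filter.mp this).1
      simpa using PySem.List.max?_isMax hm _ hm'
    rw [pv_fill_eq items max_key 0 hpw hlb hub]
    congr 2
    apply List.map_congr_left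
    intro j hj
    have hj' := (PySem.List.mem_pyRange_one).mp hj
    exact pv_look_eq_dict h j hj'.1
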